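-- pv_equiv track=rewrite | github.com/tjakopec/RZCPAN | ljubavni_kalkulator.py | izracunaj_postotak
-- ===== SOURCE A (Python) =====
-- def izracunaj_postotak(brojevi):
--     broj = int(''.join(str(b) for b in brojevi))
--     if broj < 100:
--         return broj
--     else:
--         zbroj=[]
--         if len(brojevi) % 2 == 0:
--             for i in range(0,len(brojevi),2):
--                 suma = brojevi[i] + brojevi[i+1]
--                 if suma >= 10:
--                     suma=suma % 10
--                 zbroj.append(suma)
--         else:
--             for i in range(0,len(brojevi)-1,2):
--                 suma = brojevi[i] + brojevi[i+1]
--                 if suma >= 10: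
--                     suma=suma % 10
--                 zbroj.append(suma)
--             zbroj.append(brojevi[-1])
--         return izracunaj_postotak(zbroj)
-- ===== SOURCE B (Python) =====
-- def izracunaj_postotak(brojevi):
--     while True:
--         broj = int(''.join(str(b) for b in brojevi))
--         if broj < 100:
--             return broj
--         zbroj = []
--         prev = None
--         for x in brojevi:
--             if prev is None:
--                 prev = x
--             else:
--                 s = prev + x
--                 zbroj.append(s % 10 if s >= 10 else s)
--                 prev = None
--         if prev is not None:
--             zbroj.append(prev)
--         brojevi = zbroj
-- ===== Notes on version B (the rewrite author's own statement) =====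
-- stated objective: alternative
-- what changed: Replaces A's recursion with two index-driven even/odd loop branches by an iterative outer loop whose reduction round is a single buffered pass over the elements (pair the buffered element with the next one, append the buffered element when one remains), handling even and odd lengths uniformly without indices or a parity case split.
import Mathlib
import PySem

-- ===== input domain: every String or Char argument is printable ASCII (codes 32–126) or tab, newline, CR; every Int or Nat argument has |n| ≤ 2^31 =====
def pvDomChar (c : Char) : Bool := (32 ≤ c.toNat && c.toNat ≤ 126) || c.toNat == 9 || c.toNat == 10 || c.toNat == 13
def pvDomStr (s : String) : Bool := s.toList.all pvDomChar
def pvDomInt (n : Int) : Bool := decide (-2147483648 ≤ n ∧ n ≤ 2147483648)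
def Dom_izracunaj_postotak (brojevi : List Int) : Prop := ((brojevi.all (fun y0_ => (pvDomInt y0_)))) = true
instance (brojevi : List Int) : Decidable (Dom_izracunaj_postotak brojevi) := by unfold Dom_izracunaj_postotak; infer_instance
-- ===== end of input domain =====

-- B replaces A's recursion with two index-driven parity branches by an iterative reduction whose
-- inner loop consumes the list pairwise, handling even and odd lengths uniformly (objective: simpler).

-- ===== PORT A =====

-- int(''.join(str(b) for b in brojevi)); none = ValueError (empty list, or a '-' after the first element)
def pvSpojeniBroj (brojevi : List Int) : Option Int :=
  PySem.Int.ofChars? (PySem.Chars.join [] (brojevi.map PySem.Int.toChars))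

-- the loop body of A: suma = brojevi[i] + brojevi[i+1]; if suma >= 10: suma = suma % 10
def pvZbrojElem (brojevi : List Int) (i : Int) : Int :=
  let suma := PySem.List.pyGetD brojevi i 0 + PySem.List.pyGetD brojevi (i + 1) 0
  if suma ≥ 10 then PySem.Int.mod suma 10 else suma

-- termination measure for port A: one reduction round shortens a list of length ≥ 2
theorem pvZbrojLen (bs : List Int) (f : Int → Int) (x : Int) (h : 2 ≤ bs.length) :
    (if PySem.Int.mod ((bs.length : Int)) 2 = 0 then
        (PySem.List.pyRange 0 ((bs.length : Int)) 2).foldl (fun z i => z ++ [f i]) []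
      else
        ((PySem.List.pyRange 0 ((bs.length : Int) - 1) 2).foldl (fun z i => z ++ [f i]) [])
          ++ [x]).length < bs.length := by
  have hmod : PySem.Int.mod ((bs.length : Int)) 2 = (bs.length : Int) % 2 :=
    PySem.Int.mod_eq_emod_of_pos (by omega)
  rw [PySem.List.foldl_append_singleton_eq_map, PySem.List.foldl_append_singleton_eq_map,
    PySem.List.pyRange_of_pos 0 ((bs.length : Int)) (by omega),
    PySem.List.pyRange_of_pos 0 ((bs.length : Int) - 1) (by omega)]
  split_ifs <;> simp_all <;> omega

def izracunaj_postotak (brojevi : List Int) : Int :=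
  match pvSpojeniBroj brojevi with
  | none => 0  -- Python raises ValueError here; outside Pre_
  | some broj =>
    if broj < 100 then broj
    else if brojevi.length < 2 then broj
      -- Python recurses forever on the unchanged singleton here; totality guard, outside Pre_
    else
      let n : Int := (brojevi.length : Int)
      let zbroj : List Int :=
        if PySem.Int.mod n 2 = 0 then
          (PySem.List.pyRange 0 n 2).foldl (fun z i => z ++ [pvZbrojElem brojevi i]) []
        else
          ((PySem.List.pyRange 0 (n - 1) 2).foldl (fun z i => z ++ [pvZbrojElem brojevi i]) [])
            ++ [(PySem.List.pyGet? brojevi (-1)).getD 0]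
      izracunaj_postotak zbroj
termination_by brojevi.length
decreasing_by
  exact pvZbrojLen brojevi (fun i => pvZbrojElem brojevi i)
    ((PySem.List.pyGet? brojevi (-1)).getD 0) (by omega)

-- ===== PORT B =====

-- proof-side characterisation of one reduction round, needed by port B's termination argument
def pvKorak : List Int → List Int
  | a :: b :: rest =>
    (let s := a + b
     if s ≥ 10 then PySem.Int.mod s 10 else s) :: pvKorak rest
  | rest => rest

theorem pvKorak_length_le (l : List Int) : (pvKorak l).length ≤ l.length := by
  induction l using pvKorak.induct <;> (simp [pvKorak]; try omega)

-- the body of B's inner for-loop: pair the buffered element with x, or buffer x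
def pvParStep (st : List Int × Option Int) (x : Int) : List Int × Option Int :=
  match st.2 with
  | none => (st.1, some x)
  | some prev =>
    let s := prev + x
    (st.1 ++ [if s ≥ 10 then PySem.Int.mod s 10 else s], none)

-- B's buffered single pass (with trailing flush) is the pairwise reduction; cited by the port's termination proof
theorem pvLoop_eq : ∀ (l : List Int) (acc : List Int),
    (match l.foldl pvParStep (acc, none) with
      | (z, none) => z
      | (z, some prev) => z ++ [prev]) = acc ++ pvKorak l := by
  intro l
  induction l using pvKorak.induct with
  | case1 a b t ih =>
    intro acc
    simp only [List.foldl_cons, pvParStep, pvKorak]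
    rw [ih]
    simp
  | case2 rest h =>
    intro acc
    match rest, h with
    | [], _ => simp [pvKorak]
    | [x], _ => simp [pvParStep, pvKorak]
    | a :: b :: r, h => exact absurd rfl (fun hh => h a b r hh)

def izracunaj_postotak_alt (brojevi : List Int) : Int :=
  match pvSpojeniBroj brojevi with
  | none => 0  -- Python raises ValueError here; outside Pre_
  | some broj =>
    if broj < 100 then broj
    else if brojevi.length < 2 then broj
      -- Python's outer loop never changes the singleton again; totality guard, outside Pre_
    else
      let zbroj :=
        match brojevi.foldl pvParStep ([], none) with
        | (z, none) => z
        | (z, some prev) => z ++ [prev]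
      izracunaj_postotak_alt zbroj
termination_by brojevi.length
decreasing_by
  simp only [List.foldl_attach]
  rw [pvLoop_eq brojevi []]
  cases brojevi with
  | nil => simp at *
  | cons a t =>
    cases t with
    | nil => simp at *
    | cons b t' =>
      have := pvKorak_length_le t'
      simp only [pvKorak, List.length_cons, List.nil_append]
      omega

-- ===== PRECONDITION & SPEC =====
-- Pre_ is exactly the set of inputs on which the Python A returns: an empty list or any negative
-- element after the first makes int(''.join(...)) raise ValueError, and a singleton ≥ 100 recurses forever.
def Pre_izracunaj_postotak (brojevi : List Int) : Prop :=
  brojevi ≠ [] ∧ (∀ x ∈ brojevi.tail, 0 ≤ x) ∧ (brojevi.length = 1 → brojevi.getD 0 0 < 100)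
instance (brojevi : List Int) : Decidable (Pre_izracunaj_postotak brojevi) := by
  unfold Pre_izracunaj_postotak; infer_instance

def pvWitness_izracunaj_postotak : List Int := [1, 9, 9, 0, 1, 2]

def Spec_izracunaj_postotak (brojevi : List Int) (out : Int) : Prop := out = izracunaj_postotak_alt brojevi
instance (brojevi : List Int) (out : Int) : Decidable (Spec_izracunaj_postotak brojevi out) := by unfold Spec_izracunaj_postotak; infer_instance

-- ===== CLAIM (what is proved, stated in full; the proofs are below) =====
def Claim_equal_izracunaj_postotak : Prop := ∀ (brojevi : List Int), Dom_izracunaj_postotak brojevi → Pre_izracunaj_postotak brojevi → Spec_izracunaj_postotak brojevi (izracunaj_postotak brojevi)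

-- ===== LEMMAS AND PROOFS =====

theorem pvZbrojElem_zero (a b : Int) (t : List Int) :
    pvZbrojElem (a :: b :: t) 0 = (let s := a + b; if s ≥ 10 then PySem.Int.mod s 10 else s) := by
  simp [pvZbrojElem, PySem.List.pyGetD]

theorem pvZbrojElem_shift (a b : Int) (t : List Int) (k : Nat) :
    pvZbrojElem (a :: b :: t) (2 * (k : Int) + 2) = pvZbrojElem t (2 * (k : Int)) := by
  have h1 : (2 * (k : Int) + 2) = ((2 * k + 2 : Nat) : Int) := by push_cast; ring
  have h3 : (2 * (k : Int) + 2 + 1) = ((2 * k + 3 : Nat) : Int) := by push_cast; ring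
  have h4 : (2 * (k : Int) + 1) = ((2 * k + 1 : Nat) : Int) := by push_cast; ring
  have h2 : (2 * (k : Int)) = ((2 * k : Nat) : Int) := by push_cast; ring
  unfold pvZbrojElem
  rw [h3, h1, h4, h2, PySem.List.pyGetD_natCast, PySem.List.pyGetD_natCast,
    PySem.List.pyGetD_natCast, PySem.List.pyGetD_natCast]
  simp [List.getD]

theorem pvEvenCase : ∀ (bs : List Int), bs.length % 2 = 0 →
    (List.range (bs.length / 2)).map (fun (k : Nat) => pvZbrojElem bs (2 * (k : Int))) = pvKorak bs := by
  intro bs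
  induction bs using pvKorak.induct with
  | case1 a b t ih =>
    intro hpar
    have hlen : (a :: b :: t).length / 2 = t.length / 2 + 1 := by simp; omega
    rw [hlen, List.range_succ_eq_map]
    simp only [List.map_cons, List.map_map]
    have hfun : ((fun (k : Nat) => pvZbrojElem (a :: b :: t) (2 * (k : Int))) ∘ Nat.succ) =
        (fun (k : Nat) => pvZbrojElem t (2 * (k : Int))) := by
      funext k
      have e : (2 * ((k + 1 : Nat) : Int)) = 2 * (k : Int) + 2 := by push_cast; ring
      simpa [Function.comp, e] using pvZbrojElem_shift a b t k
    rw [hfun, ih (by simp at hpar; omega)]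
    simpa [pvKorak] using pvZbrojElem_zero a b t
  | case2 rest h =>
    intro hpar
    match rest, h with
    | [], _ => simp [pvKorak]
    | [x], _ => simp at hpar
    | a :: b :: r, h => exact absurd rfl (fun hh => h a b r hh)

theorem pvOddCase : ∀ (bs : List Int), bs.length % 2 = 1 →
    ((List.range (bs.length / 2)).map (fun (k : Nat) => pvZbrojElem bs (2 * (k : Int))))
      ++ [bs.getLast?.getD 0] = pvKorak bs := by
  intro bs
  induction bs using pvKorak.induct with
  | case1 a b t ih =>
    intro hpar
    have hlen : (a :: b :: t).length / 2 = t.length / 2 + 1 := by simp; omega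
    rw [hlen, List.range_succ_eq_map]
    simp only [List.map_cons, List.map_map]
    have hfun : ((fun (k : Nat) => pvZbrojElem (a :: b :: t) (2 * (k : Int))) ∘ Nat.succ) =
        (fun (k : Nat) => pvZbrojElem t (2 * (k : Int))) := by
      funext k
      have e : (2 * ((k + 1 : Nat) : Int)) = 2 * (k : Int) + 2 := by push_cast; ring
      simpa [Function.comp, e] using pvZbrojElem_shift a b t k
    have hne : t ≠ [] := by
      intro hnil; rw [hnil] at hpar; simp at hpar
    have hlast : (a :: b :: t).getLast? = t.getLast? := by
      cases t with
      | nil => exact absurd rfl hne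
      | cons c t' => rw [List.getLast?_cons_cons, List.getLast?_cons_cons]
    rw [hfun, hlast]
    simp only [List.cons_append]
    rw [ih (by simp at hpar; omega)]
    simpa [pvKorak] using pvZbrojElem_zero a b t
  | case2 rest h =>
    intro hpar
    match rest, h with
    | [], _ => simp at hpar
    | [x], _ => simp [pvKorak]
    | a :: b :: r, h => exact absurd rfl (fun hh => h a b r hh)

-- A's even/odd zbroj construction is exactly B's pairwise step
theorem pvZbroj_eq_korak (bs : List Int) (hlen : ¬ bs.length < 2) :
    (if PySem.Int.mod ((bs.length : Int)) 2 = 0 then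
        (PySem.List.pyRange 0 ((bs.length : Int)) 2).foldl (fun z i => z ++ [pvZbrojElem bs i]) []
      else
        ((PySem.List.pyRange 0 ((bs.length : Int) - 1) 2).foldl
            (fun z i => z ++ [pvZbrojElem bs i]) [])
          ++ [(PySem.List.pyGet? bs (-1)).getD 0]) = pvKorak bs := by
  have hmod : PySem.Int.mod ((bs.length : Int)) 2 = ((bs.length : Int) % 2) :=
    PySem.Int.mod_eq_emod_of_pos (by omega)
  by_cases hpar : bs.length % 2 = 0
  · rw [if_pos (by rw [hmod]; omega)]
    rw [PySem.List.foldl_append_singleton_eq_map,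
      PySem.List.pyRange_of_pos 0 ((bs.length : Int)) (by omega)]
    rw [if_pos (by omega)]
    have hcnt : ((((bs.length : Int)) - 0 + 2 - 1) / 2).toNat = bs.length / 2 := by omega
    rw [hcnt, List.map_map]
    rw [show ((fun i => pvZbrojElem bs i) ∘ fun (k : Nat) => (0 : Int) + 2 * (k : Int)) =
        (fun (k : Nat) => pvZbrojElem bs (2 * (k : Int))) from funext fun k => by
          simp [Function.comp]]
    exact pvEvenCase bs hpar
  · rw [if_neg (by rw [hmod]; omega)]
    rw [PySem.List.foldl_append_singleton_eq_map,
      PySem.List.pyRange_of_pos 0 ((bs.length : Int) - 1) (by omega)]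
    rw [if_pos (by omega)]
    have hcnt : (((bs.length : Int) - 1 - 0 + 2 - 1) / 2).toNat = bs.length / 2 := by omega
    rw [hcnt, List.map_map]
    rw [show ((fun i => pvZbrojElem bs i) ∘ fun (k : Nat) => (0 : Int) + 2 * (k : Int)) =
        (fun (k : Nat) => pvZbrojElem bs (2 * (k : Int))) from funext fun k => by
          simp [Function.comp]]
    rw [PySem.List.pyGet?_neg_one]
    exact pvOddCase bs (by omega)

theorem pvAB_eq : ∀ (n : Nat) (bs : List Int), bs.length = n →
    izracunaj_postotak bs = izracunaj_postotak_alt bs := by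
  intro n
  induction n using Nat.strong_induction_on with
  | _ n IH =>
    intro bs hn
    rw [izracunaj_postotak]
    rw [show izracunaj_postotak_alt bs = _ from izracunaj_postotak_alt.eq_def bs]
    cases hj : pvSpojeniBroj bs with
    | none => rfl
    | some broj =>
      simp only
      by_cases h1 : broj < 100
      · rw [if_pos h1, if_pos h1]
      · rw [if_neg h1, if_neg h1]
        by_cases h2 : bs.length < 2
        · rw [if_pos h2, if_pos h2]
        · rw [if_neg h2, if_neg h2]
          rw [pvZbroj_eq_korak bs h2, pvLoop_eq bs []]
          simp only [List.nil_append]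
          have hlt : (pvKorak bs).length < n := by
            cases bs with
            | nil => simp at h2
            | cons a t =>
              cases t with
              | nil => simp at h2
              | cons b t' =>
                have := pvKorak_length_le t'
                simp only [pvKorak, List.length_cons] at *
                omega
          exact IH _ hlt _ rfl

-- ===== VERDICT (by name: the statement is the Claim_ definition above) =====
theorem izracunaj_postotak_spec : Claim_equal_izracunaj_postotak := by
  unfold Claim_equal_izracunaj_postotak
  intro bs _ _
  unfold Spec_izracunaj_postotak
  exact pvAB_eq bs.length bs rfl
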